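-- pv_equiv track=rewrite | github.com/Ramizahf/FYP-Project | views/chatbot.py | _sanitize_guest_history
-- ===== SOURCE A (Python) =====
-- CHAT_CONTEXT_LIMIT = 12
--
-- MAX_BOT_MESSAGE_LENGTH = 2000
--
-- def _sanitize_guest_history(history):
--     """Keep only the recent client-side turns needed for guest chat context."""
--     cleaned_history = []
--     for turn in history or []:
--         role = (turn or {}).get('role', '')
--         content = ((turn or {}).get('content', '') or '').strip()
--         if role in ('user', 'assistant') and content:
--             cleaned_history.append({'role': role, 'content': content[:MAX_BOT_MESSAGE_LENGTH]})
--     return cleaned_history[-CHAT_CONTEXT_LIMIT:]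
-- ===== SOURCE B (Python) =====
-- CHAT_CONTEXT_LIMIT = 12
--
-- MAX_BOT_MESSAGE_LENGTH = 2000
--
-- def _sanitize_guest_history(history):
--     """Keep only the recent client-side turns needed for guest chat context."""
--     out = []
--     for turn in reversed(history or []):
--         role = (turn or {}).get('role', '')
--         content = ((turn or {}).get('content', '') or '').strip()
--         if role in ('user', 'assistant') and content:
--             out.append({'role': role, 'content': content[:MAX_BOT_MESSAGE_LENGTH]})
--             if len(out) == CHAT_CONTEXT_LIMIT:
--                 break
--     out.reverse()
--     return out
-- ===== Notes on version B (the rewrite author's own statement) =====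
-- stated objective: alternative
-- what changed: B scans the history backwards, collecting at most CHAT_CONTEXT_LIMIT valid turns and breaking early, then reverses the buffer, instead of cleaning every turn into a list and slicing its last 12 elements; Pre_ only excludes association lists with duplicate 'role'/'content' keys, which no Python dict produces.
import Mathlib
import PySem

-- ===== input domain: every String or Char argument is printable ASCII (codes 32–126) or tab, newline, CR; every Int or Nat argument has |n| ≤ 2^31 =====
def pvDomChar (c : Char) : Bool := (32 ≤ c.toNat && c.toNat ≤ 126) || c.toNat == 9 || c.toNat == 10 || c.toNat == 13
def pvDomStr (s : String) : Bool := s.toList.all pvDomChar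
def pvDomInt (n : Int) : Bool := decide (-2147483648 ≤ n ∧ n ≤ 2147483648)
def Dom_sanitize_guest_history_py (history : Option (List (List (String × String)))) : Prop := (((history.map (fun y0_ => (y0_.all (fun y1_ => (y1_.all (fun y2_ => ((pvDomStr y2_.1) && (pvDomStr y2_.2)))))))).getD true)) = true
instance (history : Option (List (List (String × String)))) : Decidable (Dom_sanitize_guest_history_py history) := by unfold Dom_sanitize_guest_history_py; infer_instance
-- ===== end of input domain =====

-- B changes: backward scan with early stop after CHAT_CONTEXT_LIMIT valid turns, then reverse,
-- instead of cleaning everything and slicing the last 12 ('alternative'; same result proved).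

-- ===== PORT A =====
-- forward scan: clean every turn, append the valid ones, slice cleaned[-12:]
def sanitize_guest_history_py (history : Option (List (List (String × String)))) : List (List (String × String)) :=
  let cleaned := (history.getD []).foldl (fun acc turn =>
    let t := if turn = [] then ([] : List (String × String)) else turn      -- (turn or {})
    let role := PySem.Dict.getD (PySem.Dict.mk t) "role" ""
    let c0 := PySem.Dict.getD (PySem.Dict.mk t) "content" ""
    let content := PySem.Str.strip (if c0 = "" then "" else c0)             -- (... or '').strip()
    if (role = "user" ∨ role = "assistant") ∧ content ≠ "" then
      acc ++ [[("role", role), ("content", PySem.Str.slice content none (some 2000))]]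
    else acc) []
  PySem.List.slice cleaned (some (-12)) none                                -- cleaned[-12:]

-- ===== PORT B =====
-- loop over reversed(history or []), append cleaned valid turns, break at 12, reverse at end
def pvAltLoop : List (List (String × String)) → List (List (String × String)) → List (List (String × String))
  | [], out => out
  | turn :: rest, out =>
    let t := if turn = [] then ([] : List (String × String)) else turn
    let role := PySem.Dict.getD (PySem.Dict.mk t) "role" ""
    let c0 := PySem.Dict.getD (PySem.Dict.mk t) "content" ""
    let content := PySem.Str.strip (if c0 = "" then "" else c0)
    if (role = "user" ∨ role = "assistant") ∧ content ≠ "" then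
      let out' := out ++ [[("role", role), ("content", PySem.Str.slice content none (some 2000))]]
      if out'.length = 12 then out' else pvAltLoop rest out'
    else pvAltLoop rest out

def sanitize_guest_history_py_alt (history : Option (List (List (String × String)))) : List (List (String × String)) :=
  (pvAltLoop (history.getD []).reverse []).reverse

-- ===== PRECONDITION & SPEC =====
-- Pre_ excludes turns whose association list repeats the "role" or "content" key: such lists
-- do not represent Python dicts (whose keys are unique), so no Python input is excluded.
def Pre_sanitize_guest_history_py (history : Option (List (List (String × String)))) : Prop :=
  ∀ turn ∈ history.getD [], (turn.map Prod.fst).count "role" ≤ 1 ∧ (turn.map Prod.fst).count "content" ≤ 1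
instance (history : Option (List (List (String × String)))) : Decidable (Pre_sanitize_guest_history_py history) := by unfold Pre_sanitize_guest_history_py; infer_instance
def pvWitness_sanitize_guest_history_py : (Option (List (List (String × String)))) :=
  some [[("role", "user"), ("content", " hello ")], [("role", "assistant"), ("content", "hi")], [("role", "system"), ("content", "x")], []]
def Spec_sanitize_guest_history_py (history : Option (List (List (String × String)))) (out : List (List (String × String))) : Prop := out = sanitize_guest_history_py_alt history
instance (history : Option (List (List (String × String)))) (out : List (List (String × String))) : Decidable (Spec_sanitize_guest_history_py history out) := by unfold Spec_sanitize_guest_history_py; infer_instance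

-- ===== CLAIM (what is proved, stated in full; the proofs are below) =====
def Claim_equal_sanitize_guest_history_py : Prop := ∀ (history : Option (List (List (String × String)))), Dom_sanitize_guest_history_py history → Pre_sanitize_guest_history_py history → Spec_sanitize_guest_history_py history (sanitize_guest_history_py history)

-- ===== LEMMAS AND PROOFS =====

-- the common cleaning step, as an Option (proof-side only)
def pvClean (turn : List (String × String)) : Option (List (String × String)) :=
  let t := if turn = [] then ([] : List (String × String)) else turn
  let role := PySem.Dict.getD (PySem.Dict.mk t) "role" ""
  let c0 := PySem.Dict.getD (PySem.Dict.mk t) "content" ""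
  let content := PySem.Str.strip (if c0 = "" then "" else c0)
  if (role = "user" ∨ role = "assistant") ∧ content ≠ "" then
    some [("role", role), ("content", PySem.Str.slice content none (some 2000))]
  else none

-- A's fold body, appending the cleaned turn when valid
theorem pvA_body (acc : List (List (String × String))) (turn : List (String × String)) :
    (let t := if turn = [] then ([] : List (String × String)) else turn
     let role := PySem.Dict.getD (PySem.Dict.mk t) "role" ""
     let c0 := PySem.Dict.getD (PySem.Dict.mk t) "content" ""
     let content := PySem.Str.strip (if c0 = "" then "" else c0)
     if (role = "user" ∨ role = "assistant") ∧ content ≠ "" then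
       acc ++ [[("role", role), ("content", PySem.Str.slice content none (some 2000))]]
     else acc) = acc ++ (pvClean turn).toList := by
  simp only [pvClean]
  split <;> split <;> split <;> simp

theorem pvA_foldl (l : List (List (String × String))) (acc : List (List (String × String))) :
    l.foldl (fun acc turn =>
      let t := if turn = [] then ([] : List (String × String)) else turn
      let role := PySem.Dict.getD (PySem.Dict.mk t) "role" ""
      let c0 := PySem.Dict.getD (PySem.Dict.mk t) "content" ""
      let content := PySem.Str.strip (if c0 = "" then "" else c0)
      if (role = "user" ∨ role = "assistant") ∧ content ≠ "" then
        acc ++ [[("role", role), ("content", PySem.Str.slice content none (some 2000))]]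
      else acc) acc = acc ++ l.filterMap pvClean := by
  induction l generalizing acc with
  | nil => simp
  | cons turn rest ih =>
    rw [List.foldl_cons, pvA_body, List.filterMap_cons, ih]
    cases pvClean turn <;> simp

-- B's loop step, via pvClean
theorem pvAltLoop_cons (turn : List (String × String)) (rest : List (List (String × String)))
    (out : List (List (String × String))) :
    pvAltLoop (turn :: rest) out =
      match pvClean turn with
      | none => pvAltLoop rest out
      | some r => if (out ++ [r]).length = 12 then out ++ [r] else pvAltLoop rest (out ++ [r]) := by
  simp only [pvAltLoop, pvClean]
  split <;> split <;> split <;> simp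

-- B's loop collects the first 12 cleaned turns
theorem pvB_loop (l : List (List (String × String))) (out : List (List (String × String)))
    (h : out.length < 12) :
    pvAltLoop l out = (out ++ l.filterMap pvClean).take 12 := by
  induction l generalizing out with
  | nil =>
    simp only [pvAltLoop, List.filterMap_nil, List.append_nil]
    exact (List.take_of_length_le (Nat.le_of_lt h)).symm
  | cons turn rest ih =>
    rw [pvAltLoop_cons, List.filterMap_cons]
    cases hc : pvClean turn with
    | none => exact ih out h
    | some r =>
      by_cases h12 : (out ++ [r]).length = 12
      · simp only [if_pos h12]
        rw [show out ++ r :: rest.filterMap pvClean = (out ++ [r]) ++ rest.filterMap pvClean by simp,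
            ← h12, List.take_left]
      · simp only [if_neg h12]
        rw [ih (out ++ [r]) (by simp at h12 ⊢; omega)]
        simp

theorem pvTakeRev {α : Type} (xs : List α) (n : Nat) :
    (xs.reverse.take n).reverse = xs.drop (xs.length - n) := by
  rw [List.take_reverse, List.reverse_reverse]

-- ===== VERDICT (by name: the statement is the Claim_ definition above) =====
theorem sanitize_guest_history_py_spec : Claim_equal_sanitize_guest_history_py := by
  intro history _ _
  unfold Spec_sanitize_guest_history_py sanitize_guest_history_py sanitize_guest_history_py_alt
  rw [pvA_foldl, pvB_loop _ _ (by simp), List.nil_append, List.nil_append,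
      List.filterMap_reverse, pvTakeRev]
  show PySem.List.slice ((history.getD []).filterMap pvClean) (some (-12)) none = _
  rw [PySem.List.slice_from_neg_ofNat _ 12 (by omega)]
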